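-- pv_equiv track=rewrite | github.com/Cialyni/SPbU_python | src/LeetCode/leetcode_task4.py | robot_move
-- ===== SOURCE A (Python) =====
-- from typing import List, Tuple
--
-- def robot_move(
--     current_pos: Tuple[int, int],
--     move_orientation: Tuple[int, int],
--     obstacles: Tuple[Tuple[int, int]],
--     k: int,
-- ):
--     x, y = current_pos
--     for i in range(k):
--         if (x + move_orientation[0], y + move_orientation[1]) in obstacles:
--             return x, y
--         x += move_orientation[0]
--         y += move_orientation[1]
--     return x, y
-- ===== SOURCE B (Python) =====
-- def _hit(x, y, dx, dy, ox, oy):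
--     # step index t >= 1 at which the obstacle (ox, oy) lies on the ray, if any
--     if dx == 0 and dy == 0:
--         return 1 if (ox, oy) == (x, y) else None
--     if dx != 0:
--         q, r = divmod(ox - x, dx)
--         if r != 0 or oy - y != q * dy:
--             return None
--     else:
--         if ox != x:
--             return None
--         q, r = divmod(oy - y, dy)
--         if r != 0:
--             return None
--     return q if q >= 1 else None
--
--
-- def robot_move(current_pos, move_orientation, obstacles, k):
--     x, y = current_pos
--     dx, dy = move_orientation
--     steps = k if k > 0 else 0
--     for ox, oy in obstacles:
--         t = _hit(x, y, dx, dy, ox, oy)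
--         if t is not None and t - 1 < steps:
--             steps = t - 1
--     return (x + steps * dx, y + steps * dy)
-- ===== Notes on version B (the rewrite author's own statement) =====
-- stated objective: faster
-- what changed: B replaces A's step-by-step walk over range(k) (testing obstacle membership at every step) with a single pass over the obstacles that computes, via divmod, the step index at which each obstacle on the ray would be hit, takes the minimum, and jumps directly to start + min(k, first_hit - 1) * direction.
import Mathlib
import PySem

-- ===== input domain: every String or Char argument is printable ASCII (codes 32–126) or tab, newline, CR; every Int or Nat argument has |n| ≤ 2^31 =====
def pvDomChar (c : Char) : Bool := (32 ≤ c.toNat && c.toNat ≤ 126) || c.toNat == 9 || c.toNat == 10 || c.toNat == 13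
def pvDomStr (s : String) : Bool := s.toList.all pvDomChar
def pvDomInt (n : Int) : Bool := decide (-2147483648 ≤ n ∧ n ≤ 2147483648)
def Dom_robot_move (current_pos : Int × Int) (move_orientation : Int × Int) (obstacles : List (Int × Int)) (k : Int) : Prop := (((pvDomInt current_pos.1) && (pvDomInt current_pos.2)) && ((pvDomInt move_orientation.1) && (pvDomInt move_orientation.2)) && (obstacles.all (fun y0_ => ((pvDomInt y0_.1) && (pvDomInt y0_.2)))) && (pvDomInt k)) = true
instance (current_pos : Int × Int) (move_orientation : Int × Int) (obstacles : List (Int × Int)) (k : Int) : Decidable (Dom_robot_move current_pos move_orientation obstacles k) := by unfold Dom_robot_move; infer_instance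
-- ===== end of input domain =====

-- B replaces A's step-by-step walk (O(k·m)) by computing, per obstacle, the step index at which
-- it would be hit and jumping directly to start + min(k, first_hit − 1)·direction (O(m)): faster.

-- ===== PORT A =====
-- the `for i in range(k)` loop with early return, as structural recursion on the remaining steps
def robotLoopA (d : Int × Int) (obs : List (Int × Int)) : Nat → Int × Int → Int × Int
  | 0, p => p
  | n + 1, p =>
    if obs.contains (p.1 + d.1, p.2 + d.2) then p
    else robotLoopA d obs n (p.1 + d.1, p.2 + d.2)

def robot_move (current_pos : Int × Int) (move_orientation : Int × Int) (obstacles : List (Int × Int)) (k : Int) : Int × Int :=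
  robotLoopA move_orientation obstacles k.toNat current_pos

-- ===== PORT B =====
-- the q-computing part of Source B's _hit (its two divmod branches); none = the early `return None`s
def robotHitQ (x y dx dy ox oy : Int) : Option Int :=
  if dx ≠ 0 then
    match PySem.Int.divmod? (ox - x) dx with
    | some (q, r) => if r ≠ 0 ∨ oy - y ≠ q * dy then none else some q
    | none => none
  else if ox ≠ x then none
  else
    match PySem.Int.divmod? (oy - y) dy with
    | some (q, r) => if r ≠ 0 then none else some q
    | none => none

-- Source B's _hit: the step index t ≥ 1 at which obstacle (ox,oy) is hit, if any
def robotHitB (x y dx dy ox oy : Int) : Option Int :=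
  if dx = 0 ∧ dy = 0 then (if ox = x ∧ oy = y then some 1 else none)
  else
    match robotHitQ x y dx dy ox oy with
    | some q => if 1 ≤ q then some q else none
    | none => none

-- body of Source B's for-loop over obstacles
def robotStep (x y dx dy : Int) (steps : Int) (o : Int × Int) : Int :=
  match robotHitB x y dx dy o.1 o.2 with
  | some t => if t - 1 < steps then t - 1 else steps
  | none => steps

def robot_move_alt (current_pos : Int × Int) (move_orientation : Int × Int) (obstacles : List (Int × Int)) (k : Int) : Int × Int :=
  let steps := obstacles.foldl (robotStep current_pos.1 current_pos.2 move_orientation.1 move_orientation.2) (if 0 < k then k else 0)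
  (current_pos.1 + steps * move_orientation.1, current_pos.2 + steps * move_orientation.2)

-- ===== PRECONDITION & SPEC =====
def Spec_robot_move (current_pos : Int × Int) (move_orientation : Int × Int) (obstacles : List (Int × Int)) (k : Int) (out : Int × Int) : Prop := out = robot_move_alt current_pos move_orientation obstacles k
instance (current_pos : Int × Int) (move_orientation : Int × Int) (obstacles : List (Int × Int)) (k : Int) (out : Int × Int) : Decidable (Spec_robot_move current_pos move_orientation obstacles k out) := by unfold Spec_robot_move; infer_instance

-- ===== CLAIM (what is proved, stated in full; the proofs are below) =====
def Claim_equal_robot_move : Prop := ∀ (current_pos : Int × Int) (move_orientation : Int × Int) (obstacles : List (Int × Int)) (k : Int), Dom_robot_move current_pos move_orientation obstacles k → Spec_robot_move current_pos move_orientation obstacles k (robot_move current_pos move_orientation obstacles k)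

-- ===== LEMMAS AND PROOFS =====

theorem pv_divmod_eq {a b : Int} (hb : b ≠ 0) :
    PySem.Int.divmod? a b = some (PySem.Int.floordiv a b, PySem.Int.mod a b) := by
  simp [PySem.Int.divmod?, hb]
  exact ⟨rfl, rfl⟩

theorem pv_divmod_none {a b : Int} (hb : b = 0) : PySem.Int.divmod? a b = none := by
  simp [PySem.Int.divmod?, hb]

-- number of steps A's loop actually takes
def robotStepsN (d : Int × Int) (obs : List (Int × Int)) : Nat → Int × Int → Nat
  | 0, _ => 0
  | n + 1, p =>
    if obs.contains (p.1 + d.1, p.2 + d.2) then 0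
    else robotStepsN d obs n (p.1 + d.1, p.2 + d.2) + 1

theorem robotLoopA_eq (d : Int × Int) (obs : List (Int × Int)) (n : Nat) (p : Int × Int) :
    robotLoopA d obs n p =
      (p.1 + (robotStepsN d obs n p : Int) * d.1, p.2 + (robotStepsN d obs n p : Int) * d.2) := by
  induction n generalizing p with
  | zero => simp [robotLoopA, robotStepsN]
  | succ n ih =>
    simp only [robotLoopA, robotStepsN]
    split
    · simp
    · rw [ih]
      simp only [Prod.mk.injEq]
      push_cast
      constructor <;> ring

theorem robotStepsN_le (d : Int × Int) (obs : List (Int × Int)) (n : Nat) (p : Int × Int) :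
    robotStepsN d obs n p ≤ n := by
  induction n generalizing p with
  | zero => simp [robotStepsN]
  | succ n ih =>
    simp only [robotStepsN]
    split
    · omega
    · exact Nat.succ_le_succ (ih _)

theorem robotStepsN_no_hit (d : Int × Int) (obs : List (Int × Int)) (n : Nat) (p : Int × Int)
    (i : Nat) (hi : i < robotStepsN d obs n p) :
    (p.1 + ((i : Int) + 1) * d.1, p.2 + ((i : Int) + 1) * d.2) ∉ obs := by
  induction n generalizing p i with
  | zero => simp [robotStepsN] at hi
  | succ n ih =>
    simp only [robotStepsN] at hi
    split at hi
    · omega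
    · rename_i hc
      cases i with
      | zero =>
        intro hmem
        exact hc (by simpa using hmem)
      | succ j =>
        have hj := ih (p.1 + d.1, p.2 + d.2) j (by omega)
        intro hmem
        apply hj
        have h1 : p.1 + d.1 + ((j : Int) + 1) * d.1 = p.1 + (((j : Nat).succ : Int) + 1) * d.1 := by
          push_cast; ring
        have h2 : p.2 + d.2 + ((j : Int) + 1) * d.2 = p.2 + (((j : Nat).succ : Int) + 1) * d.2 := by
          push_cast; ring
        rw [h1, h2]
        exact hmem

theorem robotStepsN_last (d : Int × Int) (obs : List (Int × Int)) (n : Nat) (p : Int × Int) :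
    robotStepsN d obs n p = n ∨
      (p.1 + ((robotStepsN d obs n p : Int) + 1) * d.1,
       p.2 + ((robotStepsN d obs n p : Int) + 1) * d.2) ∈ obs := by
  induction n generalizing p with
  | zero => left; simp [robotStepsN]
  | succ n ih =>
    simp only [robotStepsN]
    split
    · rename_i hc
      right
      have hmem : (p.1 + d.1, p.2 + d.2) ∈ obs := by simpa using hc
      simpa using hmem
    · rcases ih (p.1 + d.1, p.2 + d.2) with h | h
      · left; omega
      · right
        have h1 : p.1 + d.1 + ((robotStepsN d obs n (p.1 + d.1, p.2 + d.2) : Int) + 1) * d.1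
            = p.1 + (((robotStepsN d obs n (p.1 + d.1, p.2 + d.2) + 1 : Nat) : Int) + 1) * d.1 := by
          push_cast; ring
        have h2 : p.2 + d.2 + ((robotStepsN d obs n (p.1 + d.1, p.2 + d.2) : Int) + 1) * d.2
            = p.2 + (((robotStepsN d obs n (p.1 + d.1, p.2 + d.2) + 1 : Nat) : Int) + 1) * d.2 := by
          push_cast; ring
        rw [h1, h2] at h
        exact h

theorem robotHitQ_sound {x y dx dy ox oy q : Int}
    (h : robotHitQ x y dx dy ox oy = some q) : ox = x + q * dx ∧ oy = y + q * dy := by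
  unfold robotHitQ at h
  by_cases hdx : dx = 0
  · rw [if_neg (by simpa using hdx)] at h
    by_cases hox : ox = x
    swap
    · rw [if_pos (by simpa using hox)] at h
      exact absurd h (by simp)
    · rw [if_neg (by simpa using hox)] at h
      by_cases hdy : dy = 0
      · rw [pv_divmod_none hdy] at h
        exact absurd h (by simp)
      · rw [pv_divmod_eq hdy] at h
        by_cases hr : PySem.Int.mod (oy - y) dy = 0
        · rw [show ((match some (PySem.Int.floordiv (oy - y) dy, PySem.Int.mod (oy - y) dy) with
                | some (q, r) => if r ≠ 0 then none else some q
                | none => none) : Option Int)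
              = if PySem.Int.mod (oy - y) dy ≠ 0 then none else some (PySem.Int.floordiv (oy - y) dy) from rfl,
            if_neg (by simpa using hr)] at h
          injection h with hq
          have hmul := PySem.Int.floordiv_mul_add_mod (oy - y) dy
          rw [hr, add_zero, hq] at hmul
          constructor
          · rw [hdx]; ring_nf; omega
          · linarith
        · rw [show ((match some (PySem.Int.floordiv (oy - y) dy, PySem.Int.mod (oy - y) dy) with
                | some (q, r) => if r ≠ 0 then none else some q
                | none => none) : Option Int)
              = if PySem.Int.mod (oy - y) dy ≠ 0 then none else some (PySem.Int.floordiv (oy - y) dy) from rfl,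
            if_pos (by simpa using hr)] at h
          exact absurd h (by simp)
  · rw [if_pos (by simpa using hdx)] at h
    rw [pv_divmod_eq hdx] at h
    rw [show ((match some (PySem.Int.floordiv (ox - x) dx, PySem.Int.mod (ox - x) dx) with
          | some (q, r) => if r ≠ 0 ∨ oy - y ≠ q * dy then none else some q
          | none => none) : Option Int)
        = if PySem.Int.mod (ox - x) dx ≠ 0 ∨ oy - y ≠ PySem.Int.floordiv (ox - x) dx * dy then none
          else some (PySem.Int.floordiv (ox - x) dx) from rfl] at h
    by_cases hc : PySem.Int.mod (ox - x) dx ≠ 0 ∨ oy - y ≠ PySem.Int.floordiv (ox - x) dx * dy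
    · rw [if_pos hc] at h
      exact absurd h (by simp)
    · rw [if_neg hc] at h
      injection h with hq
      have hr : PySem.Int.mod (ox - x) dx = 0 := by tauto
      have hqd : oy - y = PySem.Int.floordiv (ox - x) dx * dy := by tauto
      have hmul := PySem.Int.floordiv_mul_add_mod (ox - x) dx
      rw [hr, add_zero, hq] at hmul
      rw [hq] at hqd
      constructor
      · linarith
      · linarith

theorem robotHitQ_complete {x y dx dy t : Int} (hnz : ¬(dx = 0 ∧ dy = 0)) :
    robotHitQ x y dx dy (x + t * dx) (y + t * dy) = some t := by
  unfold robotHitQ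
  by_cases hdx : dx = 0
  · have hdy : dy ≠ 0 := fun hh => hnz ⟨hdx, hh⟩
    rw [if_neg (by simpa using hdx)]
    rw [if_neg (by simp [hdx])]
    have harg : y + t * dy - y = t * dy := by ring
    rw [harg, pv_divmod_eq hdy]
    have hmod : PySem.Int.mod (t * dy) dy = 0 :=
      (PySem.Int.mod_eq_zero_iff_dvd (t * dy) dy).2 ⟨t, mul_comm t dy⟩
    have hdiv : PySem.Int.floordiv (t * dy) dy = t := by
      have hmul := PySem.Int.floordiv_mul_add_mod (t * dy) dy
      rw [hmod, add_zero] at hmul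
      exact mul_right_cancel₀ hdy hmul
    rw [show ((match some (PySem.Int.floordiv (t * dy) dy, PySem.Int.mod (t * dy) dy) with
          | some (q, r) => if r ≠ 0 then none else some q
          | none => none) : Option Int)
        = if PySem.Int.mod (t * dy) dy ≠ 0 then none else some (PySem.Int.floordiv (t * dy) dy) from rfl,
      if_neg (by simpa using hmod), hdiv]
  · rw [if_pos (by simpa using hdx)]
    have harg : x + t * dx - x = t * dx := by ring
    rw [harg, pv_divmod_eq hdx]
    have hmod : PySem.Int.mod (t * dx) dx = 0 :=
      (PySem.Int.mod_eq_zero_iff_dvd (t * dx) dx).2 ⟨t, mul_comm t dx⟩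
    have hdiv : PySem.Int.floordiv (t * dx) dx = t := by
      have hmul := PySem.Int.floordiv_mul_add_mod (t * dx) dx
      rw [hmod, add_zero] at hmul
      exact mul_right_cancel₀ hdx hmul
    rw [show ((match some (PySem.Int.floordiv (t * dx) dx, PySem.Int.mod (t * dx) dx) with
          | some (q, r) => if r ≠ 0 ∨ y + t * dy - y ≠ q * dy then none else some q
          | none => none) : Option Int)
        = if PySem.Int.mod (t * dx) dx ≠ 0 ∨ y + t * dy - y ≠ PySem.Int.floordiv (t * dx) dx * dy then none
          else some (PySem.Int.floordiv (t * dx) dx) from rfl]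
    rw [if_neg (by simp [hmod, hdiv])]
    rw [hdiv]

theorem robotHitB_sound {x y dx dy ox oy t : Int}
    (h : robotHitB x y dx dy ox oy = some t) :
    1 ≤ t ∧ ox = x + t * dx ∧ oy = y + t * dy := by
  unfold robotHitB at h
  split at h
  · rename_i hz
    split at h
    · rename_i he
      injection h with h1
      subst h1
      refine ⟨le_refl 1, ?_, ?_⟩ <;> simp [he.1, he.2, hz.1, hz.2]
    · exact absurd h (by simp)
  · rcases hq : robotHitQ x y dx dy ox oy with _ | q
    · rw [hq] at h
      exact absurd h (by simp)
    · rw [hq] at h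
      by_cases h1 : 1 ≤ q
      · rw [show ((match (some q : Option Int) with
              | some q => if 1 ≤ q then some q else none
              | none => none) : Option Int) = if 1 ≤ q then some q else none from rfl,
          if_pos h1] at h
        injection h with hqt
        subst hqt
        exact ⟨h1, robotHitQ_sound hq⟩
      · rw [show ((match (some q : Option Int) with
              | some q => if 1 ≤ q then some q else none
              | none => none) : Option Int) = if 1 ≤ q then some q else none from rfl,
          if_neg h1] at h
        exact absurd h (by simp)

theorem robotHitB_complete {x y dx dy t : Int} (ht : 1 ≤ t) :
    ∃ t', robotHitB x y dx dy (x + t * dx) (y + t * dy) = some t' ∧ 1 ≤ t' ∧ t' ≤ t := by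
  unfold robotHitB
  by_cases hz : dx = 0 ∧ dy = 0
  · refine ⟨1, ?_, le_refl 1, ht⟩
    rw [if_pos hz]
    rw [if_pos (by simp [hz.1, hz.2])]
  · refine ⟨t, ?_, ht, le_rfl⟩
    rw [if_neg hz, robotHitQ_complete hz]
    rw [show ((match (some t : Option Int) with
          | some q => if 1 ≤ q then some q else none
          | none => none) : Option Int) = if 1 ≤ t then some t else none from rfl,
      if_pos ht]

theorem robotFold_spec (x y dx dy : Int) (obs : List (Int × Int)) (s0 : Int) :
    obs.foldl (robotStep x y dx dy) s0 ≤ s0 ∧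
    (∀ o ∈ obs, ∀ t, robotHitB x y dx dy o.1 o.2 = some t →
        obs.foldl (robotStep x y dx dy) s0 ≤ t - 1) ∧
    (obs.foldl (robotStep x y dx dy) s0 = s0 ∨
      ∃ o ∈ obs, ∃ t, robotHitB x y dx dy o.1 o.2 = some t ∧
        obs.foldl (robotStep x y dx dy) s0 = t - 1) := by
  induction obs generalizing s0 with
  | nil => simp
  | cons o obs ih =>
    simp only [List.foldl_cons]
    obtain ⟨h1, h2, h3⟩ := ih (robotStep x y dx dy s0 o)
    have hstep_le : robotStep x y dx dy s0 o ≤ s0 := by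
      unfold robotStep
      split
      · split <;> omega
      · exact le_rfl
    refine ⟨le_trans h1 hstep_le, ?_, ?_⟩
    · intro o' ho' t hht
      rcases List.mem_cons.mp ho' with rfl | hmem'
      · have hss : robotStep x y dx dy s0 o' ≤ t - 1 := by
          by_cases hlt : t - 1 < s0
          · have heq : robotStep x y dx dy s0 o' = t - 1 := by simp [robotStep, hht, hlt]
            omega
          · have heq : robotStep x y dx dy s0 o' = s0 := by simp [robotStep, hht, hlt]
            omega
        exact le_trans h1 hss
      · exact h2 o' hmem' t hht
    · rcases h3 with h3 | ⟨o', ho', t, hht, hs⟩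
      · rcases hh : robotHitB x y dx dy o.1 o.2 with _ | t
        · left
          rw [h3]
          simp [robotStep, hh]
        · by_cases hlt : t - 1 < s0
          · right
            exact ⟨o, by simp, t, hh, by rw [h3]; simp [robotStep, hh, hlt]⟩
          · left
            rw [h3]
            simp [robotStep, hh, hlt]
      · right
        exact ⟨o', by simp [ho'], t, hht, hs⟩

theorem robotSteps_eq (d : Int × Int) (obs : List (Int × Int)) (p : Int × Int) (n : Nat) :
    ((robotStepsN d obs n p : Nat) : Int) = obs.foldl (robotStep p.1 p.2 d.1 d.2) (n : Int) := by
  obtain ⟨hle, hub, hmem⟩ := robotFold_spec p.1 p.2 d.1 d.2 obs (n : Int)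
  apply le_antisymm
  · rcases hmem with hs | ⟨o, ho, t, hht, hs⟩
    · rw [hs]
      exact_mod_cast robotStepsN_le d obs n p
    · obtain ⟨ht1, hx, hy⟩ := robotHitB_sound hht
      rw [hs]
      by_contra hlt
      have hilt : (t - 1).toNat < robotStepsN d obs n p := by omega
      apply robotStepsN_no_hit d obs n p (t - 1).toNat hilt
      have hco : (p.1 + (((t - 1).toNat : Int) + 1) * d.1, p.2 + (((t - 1).toNat : Int) + 1) * d.2) = o := by
        have h1 : ((t - 1).toNat : Int) + 1 = t := by omega
        rw [h1]
        exact Prod.ext hx.symm hy.symm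
      rw [hco]
      exact ho
  · rcases robotStepsN_last d obs n p with h | h
    · rw [h]
      exact hle
    · obtain ⟨t', hsome, h1t, hle'⟩ :=
        robotHitB_complete (x := p.1) (y := p.2) (dx := d.1) (dy := d.2)
          (t := (robotStepsN d obs n p : Int) + 1) (by omega)
      have := hub _ h t' hsome
      omega

-- ===== VERDICT (by name: the statement is the Claim_ definition above) =====
theorem robot_move_spec : Claim_equal_robot_move := by
  intro cp mo obs k _
  unfold Spec_robot_move robot_move robot_move_alt
  have hs0 : (if 0 < k then k else 0) = ((k.toNat : Nat) : Int) := by split <;> omega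
  rw [hs0, robotLoopA_eq, ← robotSteps_eq]
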